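-- pv_equiv track=rewrite | github.com/zubalr/agentic-search | scripts/select_representative_keywords_with_location.py | group_similar_keywords
-- ===== SOURCE A (Python) =====
-- def group_similar_keywords(keywords, min_group_size=3):
--     groups = []
--     current_group = []
--     for i, kw in enumerate(keywords):
--         if not current_group or kw[0].startswith(current_group[-1][0]):
--             current_group.append(kw)
--         else:
--             if len(current_group) >= min_group_size:
--                 groups.append(current_group)
--             else:
--                 groups.extend([[k] for k in current_group])
--             current_group = [kw]
--     if current_group:
--         if len(current_group) >= min_group_size:
--             groups.append(current_group)
--         else:
--             groups.extend([[k] for k in current_group])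
--     return groups
-- ===== SOURCE B (Python) =====
-- def _runs(keywords):
--     """One pass: split keywords into maximal prefix-chained runs (no grouping logic here)."""
--     runs = []
--     cur = []
--     for kw in keywords:
--         if cur and kw[0].startswith(cur[-1][0]):
--             cur.append(kw)
--         else:
--             if cur:
--                 runs.append(cur)
--             cur = [kw]
--     if cur:
--         runs.append(cur)
--     return runs
--
--
-- def group_similar_keywords(keywords, min_group_size=3):
--     out = []
--     for run in _runs(keywords):
--         if len(run) >= min_group_size:
--             out.append(run)
--         else:
--             out.extend([k] for k in run)
--     return out
-- ===== Notes on version B (the rewrite author's own statement) =====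
-- stated objective: alternative
-- what changed: B first builds the list of prefix-chained runs by recursion on the list, then in a second pass emits each run whole or as singletons, instead of A's single loop interleaving group accumulation and flushing.
import Mathlib
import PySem

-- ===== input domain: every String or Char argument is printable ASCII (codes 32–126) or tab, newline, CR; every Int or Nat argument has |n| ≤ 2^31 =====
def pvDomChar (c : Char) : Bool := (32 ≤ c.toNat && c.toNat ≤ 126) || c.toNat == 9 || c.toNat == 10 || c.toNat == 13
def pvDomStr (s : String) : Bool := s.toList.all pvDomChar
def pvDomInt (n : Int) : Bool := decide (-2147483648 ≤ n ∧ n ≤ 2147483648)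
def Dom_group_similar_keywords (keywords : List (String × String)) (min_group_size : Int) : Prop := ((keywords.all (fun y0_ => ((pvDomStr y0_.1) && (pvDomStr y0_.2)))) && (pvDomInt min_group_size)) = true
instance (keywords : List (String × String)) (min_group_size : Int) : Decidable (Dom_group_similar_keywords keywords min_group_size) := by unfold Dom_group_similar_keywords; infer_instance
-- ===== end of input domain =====

-- B builds the list of prefix-chained runs in one pass, then emits groups/singletons in a
-- second pass (two-pass decomposition of A's single interleaved loop); return value only.


-- ===== PORT A =====
-- the if/else that flushes one finished current_group into groups
def aFlushOne (m : Int) (g : List (String × String)) : List (List (String × String)) :=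
  if m ≤ (g.length : Int) then [g] else g.map (fun k => [k])

-- A's for-loop with state (groups, current_group); the [] case is the 'if current_group:' epilogue
def aLoop (m : Int) : List (String × String) → List (List (String × String)) →
    List (String × String) → List (List (String × String))
  | [], groups, cg => if cg = [] then groups else groups ++ aFlushOne m cg
  | kw :: rest, groups, cg =>
    match cg.getLast? with
    | none => aLoop m rest groups (cg ++ [kw])
    | some p =>
      if PySem.Str.startswith kw.1 p.1 then aLoop m rest groups (cg ++ [kw])
      else aLoop m rest (groups ++ aFlushOne m cg) [kw]

def group_similar_keywords (keywords : List (String × String)) (min_group_size : Int) : List (List (String × String)) :=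
  aLoop min_group_size keywords [] []

-- ===== PORT B =====
-- Source B's _runs loop: state (runs, cur); no min_group_size logic in this pass
def runsLoop : List (String × String) → List (List (String × String)) →
    List (String × String) → List (List (String × String))
  | [], runs, cur => if cur = [] then runs else runs ++ [cur]
  | kw :: rest, runs, cur =>
    match cur.getLast? with
    | none => runsLoop rest runs [kw]
    | some p =>
      if PySem.Str.startswith kw.1 p.1 then runsLoop rest runs (cur ++ [kw])
      else runsLoop rest (runs ++ [cur]) [kw]

def bRuns (keywords : List (String × String)) : List (List (String × String)) :=
  runsLoop keywords [] []

-- second pass: each run whole if long enough, else as singletons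
def group_similar_keywords_alt (keywords : List (String × String)) (min_group_size : Int) : List (List (String × String)) :=
  (bRuns keywords).flatMap (fun run =>
    if min_group_size ≤ (run.length : Int) then [run] else run.map (fun k => [k]))

-- ===== PRECONDITION & SPEC =====
def Spec_group_similar_keywords (keywords : List (String × String)) (min_group_size : Int) (out : List (List (String × String))) : Prop := out = group_similar_keywords_alt keywords min_group_size
instance (keywords : List (String × String)) (min_group_size : Int) (out : List (List (String × String))) : Decidable (Spec_group_similar_keywords keywords min_group_size out) := by unfold Spec_group_similar_keywords; infer_instance

-- ===== CLAIM (what is proved, stated in full; the proofs are below) =====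
def Claim_equal_group_similar_keywords : Prop := ∀ (keywords : List (String × String)) (min_group_size : Int), Dom_group_similar_keywords keywords min_group_size → Spec_group_similar_keywords keywords min_group_size (group_similar_keywords keywords min_group_size)

-- ===== LEMMAS AND PROOFS =====

def bEmit (m : Int) (rs : List (List (String × String))) : List (List (String × String)) :=
  rs.flatMap (fun run => if m ≤ (run.length : Int) then [run] else run.map (fun k => [k]))

lemma bEmit_append (m : Int) (xs ys : List (List (String × String))) :
    bEmit m (xs ++ ys) = bEmit m xs ++ bEmit m ys := by
  simp [bEmit]

-- runsLoop only ever appends to its accumulator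
lemma runsLoop_acc (rest : List (String × String)) :
    ∀ (runs : List (List (String × String))) (cur : List (String × String)),
      runsLoop rest runs cur = runs ++ runsLoop rest [] cur := by
  induction rest with
  | nil =>
    intro runs cur
    by_cases h : cur = [] <;> simp [runsLoop, h]
  | cons kw rest ih =>
    intro runs cur
    cases h : cur.getLast? with
    | none => simp only [runsLoop, h]; exact ih runs [kw]
    | some p =>
      simp only [runsLoop, h]
      by_cases hsw : PySem.Str.startswith kw.1 p.1 = true
      · simp only [hsw, if_pos]; exact ih runs (cur ++ [kw])
      · simp only [hsw, if_neg, Bool.not_eq_true]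
        rw [ih (runs ++ [cur]) [kw], List.nil_append, ih [cur] [kw], List.append_assoc]

-- A's loop with pending group cg equals the deferred emission of B's runs loop from the same state
lemma aLoop_eq (m : Int) (rest : List (String × String)) :
    ∀ (groups : List (List (String × String))) (cg : List (String × String)),
      aLoop m rest groups cg = groups ++ bEmit m (runsLoop rest [] cg) := by
  induction rest with
  | nil =>
    intro groups cg
    by_cases h : cg = [] <;> simp [aLoop, runsLoop, h, bEmit, aFlushOne]
  | cons kw rest ih =>
    intro groups cg
    cases h : cg.getLast? with
    | none =>
      have hc : cg = [] := by cases cg <;> simp_all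
      subst hc
      simp only [aLoop, runsLoop, h, List.nil_append]
      exact ih groups [kw]
    | some p =>
      simp only [aLoop, runsLoop, h]
      by_cases hsw : PySem.Str.startswith kw.1 p.1 = true
      · simp only [hsw, if_pos]; exact ih groups (cg ++ [kw])
      · simp only [hsw, if_neg, Bool.not_eq_true]
        rw [ih (groups ++ aFlushOne m cg) [kw], List.nil_append, runsLoop_acc rest [cg] [kw],
          bEmit_append, List.append_assoc]
        simp [bEmit, aFlushOne]

-- ===== VERDICT (by name: the statement is the Claim_ definition above) =====
theorem group_similar_keywords_spec : Claim_equal_group_similar_keywords := by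
  intro keywords m _
  show group_similar_keywords keywords m = group_similar_keywords_alt keywords m
  cases keywords with
  | nil => simp [group_similar_keywords, group_similar_keywords_alt, aLoop, bRuns, runsLoop]
  | cons kw rest =>
    show aLoop m (kw :: rest) [] [] = bEmit m (bRuns (kw :: rest))
    simp only [aLoop, runsLoop, bRuns, List.getLast?_nil, List.nil_append]
    exact aLoop_eq m rest [] [kw]
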